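-- pv_equiv track=rewrite | github.com/greg-mitchell/aoc | src/aoc/solution2024_5.py | is_valid_order
-- ===== SOURCE A (Python) =====
-- from typing import Sequence, DefaultDict, Set, Iterable, Mapping, Optional
--
-- def is_valid_order(updates: Iterable[int], graph: Mapping[int, Set[int]]) -> bool:
--     """Check if a given order satisfies the dependency rules.
--
--     Args:
--         updates: Sequence of numbers in the order to validate
--         graph: Dependency graph where graph[a] contains numbers that must come after a
--
--     Returns:
--         True if the order is valid, False otherwise
--     """
--     # Convert the given order to position mapping for O(1) lookup
--     position = {num: i for i, num in enumerate(updates)}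
--     update_set = set(updates)
--
--     # Check each pair of numbers in the update
--     for start in updates:
--         # Only check rules where both numbers are in this update
--         for end in graph[start] & update_set:
--             if position[start] > position[end]:
--                 return False
--
--     return True
-- ===== SOURCE B (Python) =====
-- def is_valid_order(updates, graph):
--     """Single backward pass: walk the sequence from the end keeping the set of
--     values whose last occurrence has already been passed; at each value's last
--     occurrence, every required-successor present in the sequence must already
--     lie in that set."""
--     seq = list(updates)
--     members = set(seq)
--     later = set()
--     for c in reversed(seq):
--         if c in later:
--             continue
--         for s in graph[c]:
--             if s != c and s in members and s not in later:
--                 return False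
--         later.add(c)
--     return True
-- ===== Notes on version B (the rewrite author's own statement) =====
-- stated objective: alternative
-- what changed: Replaces A's position map plus pairwise position comparison over set intersections by a single backward pass over the sequence that keeps a running set of already-passed values and checks each value's successors against it.
-- outside the precondition, e.g. on is_valid_order([4, 8, 6, 6], {8: {8, 4, 6}, 4: {8, 4}}): A returns False, B raises KeyError
import Mathlib
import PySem

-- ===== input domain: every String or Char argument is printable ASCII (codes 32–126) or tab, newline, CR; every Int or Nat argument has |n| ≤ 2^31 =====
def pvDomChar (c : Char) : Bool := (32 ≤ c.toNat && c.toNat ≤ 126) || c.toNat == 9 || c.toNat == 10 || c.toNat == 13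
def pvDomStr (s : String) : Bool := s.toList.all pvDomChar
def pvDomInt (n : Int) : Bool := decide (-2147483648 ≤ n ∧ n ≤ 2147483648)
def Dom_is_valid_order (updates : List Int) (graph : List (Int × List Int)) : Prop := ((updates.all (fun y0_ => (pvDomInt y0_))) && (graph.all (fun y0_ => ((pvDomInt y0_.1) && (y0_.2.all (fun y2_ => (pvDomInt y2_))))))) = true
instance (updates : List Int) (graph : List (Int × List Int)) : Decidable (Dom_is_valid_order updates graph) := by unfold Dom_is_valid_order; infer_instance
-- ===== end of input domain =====

-- B replaces A's position map and pairwise position comparison by a single backward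
-- pass over the sequence with a running set of already-passed values (objective: alternative).

-- ===== PORT A =====
def is_valid_order (updates : List Int) (graph : List (Int × List Int)) : Bool :=
  let position : PySem.Dict Int Int :=
    (PySem.List.enumerate updates).foldl (fun d p => d.insert p.2 p.1) PySem.Dict.empty
  let update_set : PySem.Set Int := PySem.Set.ofList updates
  updates.all (fun start =>
    (PySem.Set.inter ((graph.lookup start).getD []) update_set).all (fun e =>
      !(position.getD start 0 > position.getD e 0)))

-- ===== PORT B =====
def altLoop (graph : List (Int × List Int)) (members : PySem.Set Int) :
    List Int → PySem.Set Int → Bool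
  | [], _ => true
  | c :: rest, later =>
    if PySem.Set.contains later c then altLoop graph members rest later
    else if ((graph.lookup c).getD []).any
        (fun s => s != c && PySem.Set.contains members s && !(PySem.Set.contains later s)) then
      false
    else altLoop graph members rest (PySem.Set.add later c)

def is_valid_order_alt (updates : List Int) (graph : List (Int × List Int)) : Bool :=
  altLoop graph (PySem.Set.ofList updates) updates.reverse PySem.Set.empty

-- ===== PRECONDITION & SPEC =====
-- Pre_ excludes inputs where some element of `updates` is not a key of `graph`: there
-- Python A raises KeyError, except when an earlier scan step happens to return False
-- before reaching the missing key — an artefact of A's scan order that B (which also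
-- raises KeyError there) does not reproduce.
def Pre_is_valid_order (updates : List Int) (graph : List (Int × List Int)) : Prop :=
  ∀ x ∈ updates, x ∈ graph.map Prod.fst

instance (updates : List Int) (graph : List (Int × List Int)) : Decidable (Pre_is_valid_order updates graph) := by unfold Pre_is_valid_order; infer_instance

def pvWitness_is_valid_order : List Int × (List (Int × List Int)) :=
  ([1, 2, 1, 3], [(1, [2]), (2, []), (3, [1])])

def Spec_is_valid_order (updates : List Int) (graph : List (Int × List Int)) (out : Bool) : Prop := out = is_valid_order_alt updates graph
instance (updates : List Int) (graph : List (Int × List Int)) (out : Bool) : Decidable (Spec_is_valid_order updates graph out) := by unfold Spec_is_valid_order; infer_instance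

-- ===== CLAIM (what is proved, stated in full; the proofs are below) =====
def Claim_equal_is_valid_order : Prop := ∀ (updates : List Int) (graph : List (Int × List Int)), Dom_is_valid_order updates graph → Pre_is_valid_order updates graph → Spec_is_valid_order updates graph (is_valid_order updates graph)

-- ===== LEMMAS AND PROOFS =====

-- A's position dict, characterized by the first-occurrence index in the reversed list.
theorem index?_lt_length {α : Type} [BEq α] [LawfulBEq α] {l : List α} {x : α} {k : Nat}
    (h : PySem.List.index? l x = some k) : k < l.length := by
  obtain ⟨pre, suf, rfl, hlen, -⟩ := (PySem.List.index?_eq_some_iff _ _ _).mp h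
  simp [← hlen]

theorem index?_inj {α : Type} [BEq α] [LawfulBEq α] {l : List α} {x y : α} {k : Nat}
    (hx : PySem.List.index? l x = some k) (hy : PySem.List.index? l y = some k) : x = y := by
  obtain ⟨p1, s1, he1, hl1, -⟩ := (PySem.List.index?_eq_some_iff _ _ _).mp hx
  obtain ⟨p2, s2, he2, hl2, -⟩ := (PySem.List.index?_eq_some_iff _ _ _).mp hy
  have h1 : l[k]'(index?_lt_length hx) = x := by
    subst he1; simp [← hl1]
  have h2 : l[k]'(index?_lt_length hx) = y := by
    subst he2; simp [← hl2]
  rw [← h1, h2]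

theorem posDict_get? (u : List Int) (x : Int) :
    ((PySem.List.enumerate u).foldl (fun d p => d.insert p.2 p.1) PySem.Dict.empty).get? x
      = (PySem.List.index? u.reverse x).map (fun k => ((u.length - 1 - k : Nat) : Int)) := by
  induction u using List.reverseRecOn with
  | nil =>
    simp [PySem.List.enumerate_nil, PySem.List.index?, PySem.Dict.empty, PySem.Dict.get?]
  | append_singleton u a ih =>
    rw [PySem.List.enumerate_append, List.foldl_append, List.reverse_append]
    simp only [List.reverse_cons, List.reverse_nil, List.nil_append, List.singleton_append,
      List.length_append, List.length_cons, List.length_nil]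
    have henum : PySem.List.enumerate [a] (0 + u.length) = [(0 + (u.length : Int), a)] := by
      simp [PySem.List.enumerate_cons, PySem.List.enumerate_nil]
    rw [henum]
    simp only [List.foldl_cons, List.foldl_nil]
    rw [PySem.Dict.get?_insert]
    by_cases hxa : x = a
    · subst hxa
      rw [if_pos rfl]
      rw [show PySem.List.index? (x :: u.reverse) x = some 0 from PySem.List.index?_cons_self _ _]
      simp
    · rw [if_neg hxa, ih]
      rcases h : PySem.List.index? u.reverse x with _ | k
      · have hx : x ∉ u.reverse := (PySem.List.index?_eq_none_iff _ _).mp h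
        have : PySem.List.index? (a :: u.reverse) x = none := by
          rw [PySem.List.index?_eq_none_iff]
          simp [hx]
          intro hc; exact hxa hc
        rw [this]
        simp
      · obtain ⟨pre, suf, heq, hlen, hnm⟩ := (PySem.List.index?_eq_some_iff _ _ _).mp h
        have : PySem.List.index? (a :: u.reverse) x = some (k + 1) := by
          rw [PySem.List.index?_eq_some_iff]
          exact ⟨a :: pre, suf, by simp [heq], by simp [hlen], by
            simp [hnm]; intro hc; exact hxa hc⟩
        rw [this]
        have hk : k < u.reverse.length := index?_lt_length h
        simp only [Option.map_some]
        congr 1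
        have hk' : k < u.length := by simpa using hk
        omega

-- membership in the minimal prefix before c ↔ earlier first occurrence
theorem mem_prefix_iff_index_lt {l p q : List Int} {c x : Int}
    (hl : l = p ++ c :: q) :
    x ∈ p ↔ ∃ k, PySem.List.index? l x = some k ∧ k < p.length := by
  constructor
  · intro hxp
    obtain ⟨j, hj⟩ := Option.isSome_iff_exists.mp
      ((PySem.List.index?_isSome_iff _ _).mpr hxp)
    obtain ⟨pre, suf, hpe, hlen, hnm⟩ := (PySem.List.index?_eq_some_iff _ _ _).mp hj
    refine ⟨j, ?_, ?_⟩
    · rw [PySem.List.index?_eq_some_iff]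
      exact ⟨pre, suf ++ c :: q, by simp [hl, hpe], hlen, hnm⟩
    · have : p.length = pre.length + suf.length + 1 := by simp [hpe]; omega
      omega
  · rintro ⟨k, hk, hklt⟩
    obtain ⟨pre, suf, hpe, hlen, -⟩ := (PySem.List.index?_eq_some_iff _ _ _).mp hk
    have hkl : k < l.length := index?_lt_length hk
    have h1 : l[k]'hkl = x := by subst hpe; simp [← hlen]
    have h2 : l[k]'hkl = p[k]'hklt := by
      subst hl; exact List.getElem_append_left hklt
    rw [← h1, h2] at *
    exact List.getElem_mem hklt

theorem A_true_iff (u : List Int) (g : List (Int × List Int)) :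
    is_valid_order u g = true ↔
      ∀ s ∈ u, ∀ e ∈ (g.lookup s).getD [], e ∈ u →
        ¬(((PySem.List.enumerate u).foldl (fun d p => d.insert p.2 p.1) PySem.Dict.empty).getD s 0
          > ((PySem.List.enumerate u).foldl (fun d p => d.insert p.2 p.1) PySem.Dict.empty).getD e 0) := by
  unfold is_valid_order
  simp only [List.all_eq_true, PySem.Set.mem_inter, PySem.Set.mem_ofList, Bool.not_eq_eq_eq_not,
    Bool.not_true, decide_eq_false_iff_not, and_imp]

-- the condition B's loop establishes for the element c when the (skipped-prefix) p precedes it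
def Good (g : List (Int × List Int)) (m : PySem.Set Int) (later p : List Int) (c : Int) : Prop :=
  (c ∈ later ∨ c ∈ p) ∨ ∀ s ∈ (g.lookup c).getD [], s = c ∨ s ∉ m ∨ (s ∈ later ∨ s ∈ p)

theorem Good_iff (g : List (Int × List Int)) (m : PySem.Set Int)
    (later p later' p' : List Int) (c : Int)
    (h : ∀ x : Int, (x ∈ later ∨ x ∈ p) ↔ (x ∈ later' ∨ x ∈ p')) :
    Good g m later p c ↔ Good g m later' p' c := by
  unfold Good; simp only [h]

theorem altLoop_true_iff (g : List (Int × List Int)) (m : PySem.Set Int) (l : List Int) :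
    ∀ later : PySem.Set Int, altLoop g m l later = true ↔
      ∀ p c q, l = p ++ c :: q → Good g m later p c := by
  induction l with
  | nil =>
    intro later
    simp only [altLoop, true_iff]
    intro p c q h
    exact absurd h (by simp)
  | cons a l ih =>
    intro later
    simp only [altLoop]
    by_cases h1 : PySem.Set.contains later a = true
    · rw [if_pos h1, ih later]
      have ha : a ∈ later := (PySem.Set.contains_iff _ _).mp h1
      have hx : ∀ (p' : List Int) (x : Int), (x ∈ later ∨ x ∈ a :: p') ↔ (x ∈ later ∨ x ∈ p') := by
        intro p' x
        simp only [List.mem_cons]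
        constructor
        · rintro (h | rfl | h)
          exacts [Or.inl h, Or.inl ha, Or.inr h]
        · rintro (h | h)
          exacts [Or.inl h, Or.inr (Or.inr h)]
      constructor
      · intro hIH p c q hpq
        cases p with
        | nil =>
          obtain ⟨rfl, rfl⟩ : c = a ∧ q = l := by simpa using hpq.symm
          exact Or.inl (Or.inl ha)
        | cons a' p' =>
          obtain ⟨heq, hl'⟩ : a = a' ∧ l = p' ++ c :: q := by simpa using hpq
          subst heq
          exact (Good_iff g m later (a :: p') later p' c (hx p')).mpr (hIH p' c q hl')
      · intro hR p c q hl'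
        exact (Good_iff g m later (a :: p) later p c (hx p)).mp
          (hR (a :: p) c q (by simp [hl']))
    · rw [if_neg h1]
      have hna : a ∉ later := fun h => h1 ((PySem.Set.contains_iff _ _).mpr h)
      by_cases h2 : ((g.lookup a).getD []).any
          (fun s => s != a && PySem.Set.contains m s && !(PySem.Set.contains later s)) = true
      · rw [if_pos h2]
        simp only [Bool.false_eq_true, false_iff, not_forall]
        obtain ⟨s, hs, hprop⟩ := List.any_eq_true.mp h2
        have hsa : s ≠ a := by
          intro h; subst h; simp at hprop
        have hsml : s ∈ m ∧ s ∉ later := by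
          have := hprop; simp [hsa] at this; exact this
        have hsm : s ∈ m := hsml.1
        have hsl : s ∉ later := hsml.2
        refine ⟨[], a, l, rfl, ?_⟩
        unfold Good
        rintro ((h | h) | hall)
        · exact hna h
        · simp at h
        · rcases hall s hs with h | h | (h | h)
          · exact hsa h
          · exact h hsm
          · exact hsl h
          · simp at h
      · rw [if_neg h2, ih (PySem.Set.add later a)]
        have hgood : Good g m later [] a := by
          unfold Good
          refine Or.inr ?_
          intro s hs
          by_cases hsa : s = a
          · exact Or.inl hsa
          · have hall : ∀ x ∈ (List.lookup a g).getD [], ¬x = a → x ∈ m → x ∈ later := by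
              simpa using h2
            by_cases hsm : s ∈ m
            · exact Or.inr (Or.inr (Or.inl (hall s hs hsa hsm)))
            · exact Or.inr (Or.inl hsm)
        have hx : ∀ (p' : List Int) (x : Int),
            (x ∈ PySem.Set.add later a ∨ x ∈ p') ↔ (x ∈ later ∨ x ∈ a :: p') := by
          intro p' x
          simp only [PySem.Set.mem_add, List.mem_cons]
          tauto
        constructor
        · intro hIH p c q hpq
          cases p with
          | nil =>
            obtain ⟨rfl, rfl⟩ : c = a ∧ q = l := by simpa using hpq.symm
            exact hgood
          | cons a' p' =>
            obtain ⟨heq, hl'⟩ : a = a' ∧ l = p' ++ c :: q := by simpa using hpq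
            subst heq
            exact (Good_iff g m (PySem.Set.add later a) p' later (a :: p') c (hx p')).mp
              (hIH p' c q hl')
        · intro hR p c q hl'
          exact (Good_iff g m (PySem.Set.add later a) p later (a :: p) c (hx p)).mpr
            (hR (a :: p) c q (by simp [hl']))

theorem pos_getD (u : List Int) (x : Int) (k : Nat)
    (h : PySem.List.index? u.reverse x = some k) :
    ((PySem.List.enumerate u).foldl (fun d p => d.insert p.2 p.1) PySem.Dict.empty).getD x 0
      = ((u.length - 1 - k : Nat) : Int) := by
  have hg := posDict_get? u x
  rw [h] at hg
  have hb : ∀ (d : PySem.Dict Int Int), d.getD x 0 = (d.get? x).getD 0 := by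
    intro d; simp [PySem.Dict.getD, PySem.Dict.get?]
  rw [hb, hg]
  rfl

theorem is_valid_order_spec' (u : List Int) (g : List (Int × List Int)) :
    is_valid_order u g = is_valid_order_alt u g := by
  rw [Bool.eq_iff_iff, A_true_iff,
    show is_valid_order_alt u g
      = altLoop g (PySem.Set.ofList u) u.reverse PySem.Set.empty from rfl,
    altLoop_true_iff]
  have hlen : u.reverse.length = u.length := by simp
  have hidx : ∀ x ∈ u, ∃ k, PySem.List.index? u.reverse x = some k ∧ k < u.length := by
    intro x hx
    obtain ⟨k, hk⟩ := Option.isSome_iff_exists.mp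
      ((PySem.List.index?_isSome_iff _ _).mpr (List.mem_reverse.mpr hx))
    exact ⟨k, hk, hlen ▸ index?_lt_length hk⟩
  constructor
  · -- A-form → B-form
    intro hA p c q hrev
    have hcu : c ∈ u := by
      rw [← List.mem_reverse, hrev]; simp
    by_cases hcp : c ∈ p
    · exact Or.inl (Or.inr hcp)
    refine Or.inr ?_
    intro s hs
    by_cases hsc : s = c
    · exact Or.inl hsc
    by_cases hsu : s ∈ u
    · refine Or.inr (Or.inr (Or.inr ?_))
      have hkc : PySem.List.index? u.reverse c = some p.length :=
        (PySem.List.index?_eq_some_iff _ _ _).mpr ⟨p, q, hrev, rfl, hcp⟩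
      obtain ⟨ks, hks, hksl⟩ := hidx s hsu
      have hkcl : p.length < u.length := hlen ▸ index?_lt_length hkc
      have hne : ks ≠ p.length := by
        intro h; exact hsc (index?_inj (h ▸ hks) hkc)
      have hle : ks ≤ p.length := by
        have hposle := hA c hcu s hs hsu
        rw [pos_getD u c p.length hkc, pos_getD u s ks hks] at hposle
        have : ((u.length - 1 - p.length : Nat) : Int) ≤ ((u.length - 1 - ks : Nat) : Int) := by
          omega
        have h2 : (u.length - 1 - p.length : Nat) ≤ (u.length - 1 - ks : Nat) :=
          Nat.cast_le.mp this
        omega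
      exact (mem_prefix_iff_index_lt hrev).mpr ⟨ks, hks, lt_of_le_of_ne hle hne⟩
    · exact Or.inr (Or.inl (fun h => hsu ((PySem.Set.mem_ofList _ _).mp h)))
  · -- B-form → A-form
    intro hB s hsu e he heu
    obtain ⟨ks, hks, hksl⟩ := hidx s hsu
    obtain ⟨p, q, hrev, hplen, hsp⟩ := (PySem.List.index?_eq_some_iff _ _ _).mp hks
    rcases hB p s q hrev with (h | h) | hall
    · simp at h
    · exact absurd h hsp
    rcases hall e he with h | h | (h | h)
    · subst h; omega
    · exact absurd ((PySem.Set.mem_ofList _ _).mpr heu) h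
    · simp at h
    · obtain ⟨ke, hke, hkel⟩ := (mem_prefix_iff_index_lt hrev).mp h
      rw [pos_getD u s ks hks, pos_getD u e ke hke]
      have hkel' : ke < ks := hplen ▸ hkel
      have : (u.length - 1 - ks : Nat) ≤ (u.length - 1 - ke : Nat) := by omega
      exact not_lt.mpr (Nat.cast_le.mpr this)

-- ===== VERDICT (by name: the statement is the Claim_ definition above) =====
theorem is_valid_order_spec : Claim_equal_is_valid_order := by
  intro u g _ _
  unfold Spec_is_valid_order
  exact is_valid_order_spec' u g
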